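-- pv_equiv track=rewrite | github.com/Sumaiya-uiu/AI_Lab_Assignments | Assignments/Questions and answers/011191180_Assignment02/steepest.py | state_generation
-- ===== SOURCE A (Python) =====
-- def calc_cost(l):
--     la = l
--     cost = 0
--     for i in range(len(la)):
--         l1=l[(i+1) : len(l)]
--         ls = [j for j in l1 if la[i]>j ]
--         cost = cost + len(ls)
--     return cost
--
-- def state_generation(current_state, current_state_cost):
--     min_cost = current_state_cost
--     sli_state = current_state.copy()
--     for i in range(len(current_state)-1):
--         for j in range(i+1,len(current_state)):
--             sli_state[i],sli_state[j] = sli_state[j],sli_state[i]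
--             eitar_cost = calc_cost(sli_state)
--             if(eitar_cost < min_cost):
--                 min_cost = eitar_cost
--                 min_state = sli_state.copy()
--             sli_state = current_state.copy()
--
--     if(min_cost < current_state_cost):
--         return min_state,min_cost
--     else:
--         return current_state,None
-- ===== SOURCE B (Python) =====
-- def state_generation(current_state, current_state_cost):
--     # Incremental neighbor evaluation: compute the inversion count of the base
--     # state once, then get each swap-neighbor's cost in O(j-i) by a delta update.
--     n = len(current_state)
--     base = 0
--     for p in range(n):
--         for q in range(p + 1, n):
--             if current_state[p] > current_state[q]:
--                 base += 1
--     min_cost = current_state_cost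
--     min_state = None
--     for i in range(n - 1):
--         for j in range(i + 1, n):
--             a = current_state[i]
--             b = current_state[j]
--             d = (1 if b > a else 0) - (1 if a > b else 0)
--             for k in range(i + 1, j):
--                 x = current_state[k]
--                 d += ((1 if b > x else 0) - (1 if a > x else 0)
--                       + (1 if x > a else 0) - (1 if x > b else 0))
--             c = base + d
--             if c < min_cost:
--                 min_cost = c
--                 min_state = current_state.copy()
--                 min_state[i], min_state[j] = b, a
--     if min_state is not None:
--         return min_state, min_cost
--     return current_state, None
-- ===== Notes on version B (the rewrite author's own statement) =====
-- stated objective: faster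
-- what changed: B computes the base inversion count once and evaluates each swap-neighbor by an O(j-i) delta update over the elements between the swapped positions, instead of recomputing the full O(n^2) inversion count for every neighbor.
import Mathlib
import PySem

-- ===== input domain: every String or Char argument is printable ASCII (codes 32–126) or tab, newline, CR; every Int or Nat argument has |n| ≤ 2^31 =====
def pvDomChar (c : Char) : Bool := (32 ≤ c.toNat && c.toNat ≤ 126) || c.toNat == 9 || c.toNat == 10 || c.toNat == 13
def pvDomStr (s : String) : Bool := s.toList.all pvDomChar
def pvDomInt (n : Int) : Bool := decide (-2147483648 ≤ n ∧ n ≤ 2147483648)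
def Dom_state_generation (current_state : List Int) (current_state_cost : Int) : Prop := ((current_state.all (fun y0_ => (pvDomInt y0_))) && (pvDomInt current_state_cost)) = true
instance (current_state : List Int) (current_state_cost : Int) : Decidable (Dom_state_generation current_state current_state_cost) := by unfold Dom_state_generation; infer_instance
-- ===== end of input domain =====

-- B replaces A's full inversion recount per swap-neighbor by a one-time base count
-- plus a per-swap delta over the elements between the swapped positions (objective: faster).

-- ===== PORT A =====
-- calc_cost: l[(i+1):len(l)] with i ≥ 0 is exactly List.drop (i+1);
-- la[i] with 0 ≤ i < len(la) is exactly getD i 0 (the index is always in range here).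
def calc_cost (l : List Int) : Int :=
  (List.range l.length).foldl
    (fun cost i => cost + (((l.drop (i + 1)).filter (fun j => decide (l.getD i 0 > j))).length : Int))
    0

-- the body of A's inner loop, named so the proofs can speak about it (same steps):
-- sli_state[i], sli_state[j] = sli_state[j], sli_state[i]; cost; conditional update; reset.
def sgStepA (cs : List Int) (st : Int × Option (List Int) × List Int) (i j : Nat) :
    Int × Option (List Int) × List Int :=
  let sli := st.2.2
  let sli1 := (sli.set i (sli.getD j 0)).set j (sli.getD i 0)
  let eitar_cost := calc_cost sli1
  if eitar_cost < st.1 then (eitar_cost, some sli1, cs) else (st.1, st.2.1, cs)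

-- state threaded through the loops: (min_cost, min_state, sli_state); min_state starts
-- unbound in Python → Option, none; range(i+1, n) → List.range' (i+1) (n-(i+1)).
def state_generation (current_state : List Int) (current_state_cost : Int) : List Int × Option Int :=
  let st :=
    (List.range (current_state.length - 1)).foldl
      (fun st i =>
        (List.range' (i + 1) (current_state.length - (i + 1))).foldl
          (fun st j => sgStepA current_state st i j) st)
      (current_state_cost, (none : Option (List Int)), current_state)
  if st.1 < current_state_cost then (st.2.1.getD current_state, some st.1)
  else (current_state, none)

-- ===== PORT B =====
-- base inversion count: nested index loops of Source B
def sgBase (cs : List Int) : Int :=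
  (List.range cs.length).foldl
    (fun acc p =>
      (List.range' (p + 1) (cs.length - (p + 1))).foldl
        (fun acc q => acc + (if cs.getD p 0 > cs.getD q 0 then (1 : Int) else 0)) acc)
    0

-- the body of B's inner loop: delta update over range(i+1, j), then compare/update.
def sgStepB (cs : List Int) (base : Int) (st : Int × Option (List Int)) (i j : Nat) :
    Int × Option (List Int) :=
  let a := cs.getD i 0
  let b := cs.getD j 0
  let d :=
    (List.range' (i + 1) (j - (i + 1))).foldl
      (fun d k =>
        d + ((if b > cs.getD k 0 then (1 : Int) else 0) - (if a > cs.getD k 0 then (1 : Int) else 0)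
           + (if cs.getD k 0 > a then (1 : Int) else 0) - (if cs.getD k 0 > b then (1 : Int) else 0)))
      ((if b > a then (1 : Int) else 0) - (if a > b then (1 : Int) else 0))
  let c := base + d
  if c < st.1 then (c, some ((cs.set i b).set j a)) else st

def state_generation_alt (current_state : List Int) (current_state_cost : Int) : List Int × Option Int :=
  let base := sgBase current_state
  let st :=
    (List.range (current_state.length - 1)).foldl
      (fun st i =>
        (List.range' (i + 1) (current_state.length - (i + 1))).foldl
          (fun st j => sgStepB current_state base st i j) st)
      (current_state_cost, (none : Option (List Int)))
  match st.2 with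
  | some ms => (ms, some st.1)
  | none => (current_state, none)

-- ===== PRECONDITION & SPEC =====
def Spec_state_generation (current_state : List Int) (current_state_cost : Int) (out : List Int × Option Int) : Prop := out = state_generation_alt current_state current_state_cost
instance (current_state : List Int) (current_state_cost : Int) (out : List Int × Option Int) : Decidable (Spec_state_generation current_state current_state_cost out) := by unfold Spec_state_generation; infer_instance

-- ===== CLAIM (what is proved, stated in full; the proofs are below) =====
def Claim_equal_state_generation : Prop := ∀ (current_state : List Int) (current_state_cost : Int), Dom_state_generation current_state current_state_cost → Spec_state_generation current_state current_state_cost (state_generation current_state current_state_cost)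

-- ===== LEMMAS AND PROOFS =====

-- indicator of an inversion pair
def ind (x y : Int) : Int := if x > y then 1 else 0

-- number of elements of v smaller than a
def cnt (a : Int) (v : List Int) : Int := ((v.filter (fun y => decide (a > y))).length : Int)

-- structural inversion count
def inv2 : List Int → Int
  | [] => 0
  | x :: xs => cnt x xs + inv2 xs

-- inversions across the boundary of an append
def cross : List Int → List Int → Int
  | [], _ => 0
  | x :: u, v => cnt x v + cross u v

theorem cnt_nil (a : Int) : cnt a [] = 0 := rfl

theorem cnt_cons (a x : Int) (v : List Int) : cnt a (x :: v) = ind a x + cnt a v := by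
  by_cases h : a > x
  · simp [cnt, ind, h]; ring
  · simp [cnt, ind, h]

theorem cnt_append (a : Int) (u v : List Int) : cnt a (u ++ v) = cnt a u + cnt a v := by
  induction u with
  | nil => simp [cnt_nil]
  | cons x u ih => simp only [List.cons_append, cnt_cons, ih]; ring

theorem cross_cons_right (y : Int) (v : List Int) :
    ∀ u : List Int, cross u (y :: v) = (u.map (fun x => ind x y)).sum + cross u v := by
  intro u; induction u with
  | nil => simp [cross]
  | cons x u ih => simp only [cross, cnt_cons, ih, List.map_cons, List.sum_cons]; ring

theorem cross_append_right (v w : List Int) :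
    ∀ u : List Int, cross u (v ++ w) = cross u v + cross u w := by
  intro u; induction u with
  | nil => simp [cross]
  | cons x u ih => simp only [cross, cnt_append, ih]; ring

theorem inv2_append (u v : List Int) : inv2 (u ++ v) = inv2 u + cross u v + inv2 v := by
  induction u with
  | nil => simp [inv2, cross]
  | cons x u ih => simp only [List.cons_append, inv2, cross, cnt_append, ih]; ring

theorem sum_ind (a : Int) (v : List Int) : (v.map (fun x => ind a x)).sum = cnt a v := by
  induction v with
  | nil => simp [cnt_nil]
  | cons x v ih => simp only [List.map_cons, List.sum_cons, cnt_cons, ih]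

theorem sum_h (a b : Int) (M : List Int) :
    (M.map (fun x => ind b x - ind a x + ind x a - ind x b)).sum
      = cnt b M - cnt a M + (M.map (fun x => ind x a)).sum - (M.map (fun x => ind x b)).sum := by
  induction M with
  | nil => simp [cnt_nil]
  | cons x M ih => simp only [List.map_cons, List.sum_cons, cnt_cons, ih]; ring

theorem foldl_add_eq {α : Type} (f : α → Int) :
    ∀ (L : List α) (c : Int), L.foldl (fun acc x => acc + f x) c = c + (L.map f).sum := by
  intro L; induction L with
  | nil => simp
  | cons x L ih => intro c; simp only [List.foldl_cons, List.map_cons, List.sum_cons, ih]; ring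

theorem drop_take_succ (l : List Int) (s k : Nat) (h : s < l.length) :
    (l.drop s).take (k + 1) = l.getD s 0 :: (l.drop (s + 1)).take k := by
  rw [List.drop_eq_getElem_cons h, List.take_succ_cons, List.getD_eq_getElem _ _ h]

theorem rangeFold (l : List Int) (h : Int → Int) :
    ∀ (k s : Nat), s + k ≤ l.length → ∀ c : Int,
      (List.range' s k).foldl (fun acc q => acc + h (l.getD q 0)) c
        = c + (((l.drop s).take k).map h).sum := by
  intro k
  induction k with
  | zero => intro s _ c; simp
  | succ k ih =>
      intro s hs c
      rw [List.range'_succ, List.foldl_cons, ih (s + 1) (by omega),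
        drop_take_succ l s k (by omega)]
      simp only [List.map_cons, List.sum_cons]; ring

theorem foldl_congr_mem' {α β : Type} (L : List α) (f g : β → α → β)
    (h : ∀ a ∈ L, ∀ s, f s a = g s a) : ∀ c, L.foldl f c = L.foldl g c := by
  induction L with
  | nil => intro c; rfl
  | cons x L ih =>
      intro c
      simp only [List.foldl_cons, h x (List.mem_cons_self), ih (fun a ha s => h a (List.mem_cons_of_mem _ ha) s)]

theorem calc_cost_eq (l : List Int) :
    calc_cost l = ((List.range l.length).map (fun i => cnt (l.getD i 0) (l.drop (i + 1)))).sum := by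
  rw [calc_cost, foldl_add_eq]; simp [cnt]

theorem sum_cnt (l : List Int) :
    ((List.range l.length).map (fun i => cnt (l.getD i 0) (l.drop (i + 1)))).sum = inv2 l := by
  induction l with
  | nil => simp [inv2]
  | cons x xs ih =>
      rw [List.length_cons, List.range_succ_eq_map, List.map_cons, List.map_map, List.sum_cons]
      have hfun : ((fun i => cnt ((x :: xs).getD i 0) ((x :: xs).drop (i + 1))) ∘ Nat.succ)
          = fun i => cnt (xs.getD i 0) (xs.drop (i + 1)) := by
        funext i; rfl
      rw [hfun, ih]
      rfl

theorem calc_cost_inv (l : List Int) : calc_cost l = inv2 l := by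
  rw [calc_cost_eq, sum_cnt]

theorem sgBase_eq (cs : List Int) : sgBase cs = inv2 cs := by
  rw [sgBase, foldl_congr_mem' _ _
    (fun acc p => acc + cnt (cs.getD p 0) (cs.drop (p + 1)))
    (by
      intro p hp s
      rw [List.mem_range] at hp
      rw [rangeFold cs (fun x => if cs.getD p 0 > x then (1 : Int) else 0) _ _ (by omega)]
      have htake : (cs.drop (p + 1)).take (cs.length - (p + 1)) = cs.drop (p + 1) := by
        apply List.take_of_length_le; simp
      rw [htake]
      have : ((cs.drop (p + 1)).map (fun x => if cs.getD p 0 > x then (1 : Int) else 0)).sum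
          = cnt (cs.getD p 0) (cs.drop (p + 1)) := sum_ind _ _
      rw [this]),
    foldl_add_eq, ← calc_cost_eq, calc_cost_inv]
  simp

theorem set_decomp (y : Int) : ∀ (v : List Int) (k : Nat), k < v.length →
    v.set k y = v.take k ++ y :: v.drop (k + 1) := by
  intro v
  induction v with
  | nil => intro k hk; simp at hk
  | cons x xs ih =>
      intro k hk
      cases k with
      | zero => simp
      | succ k => simp only [List.set_cons_succ, List.take_succ_cons, List.drop_succ_cons,
          List.cons_append]
                  rw [ih k (by simpa using hk)]

theorem swap_decomp (x y : Int) : ∀ (l : List Int) (i j : Nat), i < j → j < l.length →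
    (l.set i x).set j y
      = l.take i ++ x :: (((l.drop (i + 1)).take (j - (i + 1))) ++ y :: l.drop (j + 1)) := by
  intro l
  induction l with
  | nil => intro i j _ hj; simp at hj
  | cons z zs ih =>
      intro i j hij hj
      cases i with
      | zero =>
          obtain ⟨k, rfl⟩ : ∃ k, j = k + 1 := ⟨j - 1, by omega⟩
          simp only [List.set_cons_zero, List.set_cons_succ, List.take_zero,
            List.drop_succ_cons, List.drop_zero, List.nil_append, Nat.add_sub_cancel]
          rw [set_decomp y zs k (by simpa using hj)]
      | succ m =>
          obtain ⟨k, rfl⟩ : ∃ k, j = k + 1 := ⟨j - 1, by omega⟩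
          simp only [List.set_cons_succ, List.take_succ_cons, List.drop_succ_cons,
            List.cons_append]
          rw [ih m k (by omega) (by simpa using hj)]
          have : k + 1 - (m + 1 + 1) = k - (m + 1) := by omega
          rw [this]

theorem id_decomp : ∀ (l : List Int) (i j : Nat), i < j → j < l.length →
    l = l.take i ++ l.getD i 0 :: (((l.drop (i + 1)).take (j - (i + 1))) ++ l.getD j 0 :: l.drop (j + 1)) := by
  intro l
  induction l with
  | nil => intro i j _ hj; simp at hj
  | cons z zs ih =>
      intro i j hij hj
      cases i with
      | zero =>
          obtain ⟨k, rfl⟩ : ∃ k, j = k + 1 := ⟨j - 1, by omega⟩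
          simp only [List.take_zero, List.nil_append, List.getD_cons_zero, List.drop_succ_cons,
            List.drop_zero, Nat.add_sub_cancel, List.getD_cons_succ]
          have hk : k < zs.length := by simpa using hj
          have := List.take_append_drop k zs
          conv_lhs => rw [show z :: zs = z :: (zs.take k ++ zs.drop k) by rw [List.take_append_drop]]
          rw [List.drop_eq_getElem_cons hk, List.getD_eq_getElem _ _ hk]
      | succ m =>
          obtain ⟨k, rfl⟩ : ∃ k, j = k + 1 := ⟨j - 1, by omega⟩
          simp only [List.take_succ_cons, List.cons_append, List.getD_cons_succ,
            List.drop_succ_cons]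
          have : k + 1 - (m + 1 + 1) = k - (m + 1) := by omega
          rw [this]
          exact congrArg (z :: ·) (ih m k (by omega) (by simpa using hj))

theorem inv2_swap_core (P M S : List Int) (a b : Int) :
    inv2 (P ++ b :: (M ++ a :: S)) = inv2 (P ++ a :: (M ++ b :: S)) + (ind b a - ind a b)
      + (M.map (fun x => ind b x - ind a x + ind x a - ind x b)).sum := by
  simp only [inv2_append, inv2, cnt_append, cnt_cons, cross_append_right, cross_cons_right,
    sum_h]
  ring

theorem inv2_swap (l : List Int) (i j : Nat) (hij : i < j) (hj : j < l.length) :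
    inv2 ((l.set i (l.getD j 0)).set j (l.getD i 0))
      = inv2 l + (ind (l.getD j 0) (l.getD i 0) - ind (l.getD i 0) (l.getD j 0))
        + (((l.drop (i + 1)).take (j - (i + 1))).map
            (fun x => ind (l.getD j 0) x - ind (l.getD i 0) x
              + ind x (l.getD i 0) - ind x (l.getD j 0))).sum := by
  rw [swap_decomp (l.getD j 0) (l.getD i 0) l i j hij hj]
  conv_rhs => rw [show inv2 l
    = inv2 (l.take i ++ l.getD i 0 :: (((l.drop (i + 1)).take (j - (i + 1))) ++ l.getD j 0 :: l.drop (j + 1)))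
    by rw [← id_decomp l i j hij hj]]
  exact inv2_swap_core _ _ _ _ _

-- cost of B's delta fold
theorem delta_eq (cs : List Int) (i j : Nat) (hij : i < j) (hj : j < cs.length) :
    (List.range' (i + 1) (j - (i + 1))).foldl
        (fun d k =>
          d + ((if cs.getD j 0 > cs.getD k 0 then (1 : Int) else 0)
             - (if cs.getD i 0 > cs.getD k 0 then (1 : Int) else 0)
             + (if cs.getD k 0 > cs.getD i 0 then (1 : Int) else 0)
             - (if cs.getD k 0 > cs.getD j 0 then (1 : Int) else 0)))
        ((if cs.getD j 0 > cs.getD i 0 then (1 : Int) else 0)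
          - (if cs.getD i 0 > cs.getD j 0 then (1 : Int) else 0))
      = (ind (cs.getD j 0) (cs.getD i 0) - ind (cs.getD i 0) (cs.getD j 0))
        + (((cs.drop (i + 1)).take (j - (i + 1))).map
            (fun x => ind (cs.getD j 0) x - ind (cs.getD i 0) x
              + ind x (cs.getD i 0) - ind x (cs.getD j 0))).sum := by
  exact rangeFold cs (fun x => ind (cs.getD j 0) x - ind (cs.getD i 0) x
      + ind x (cs.getD i 0) - ind x (cs.getD j 0)) (j - (i + 1)) (i + 1) (by omega)
    (ind (cs.getD j 0) (cs.getD i 0) - ind (cs.getD i 0) (cs.getD j 0))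

def SGRel (cs : List Int) (c0 : Int) (sa : Int × Option (List Int) × List Int)
    (sb : Int × Option (List Int)) : Prop :=
  sa.1 = sb.1 ∧ sa.2.1 = sb.2 ∧ sa.2.2 = cs ∧
    ((sb.2 = none ∧ sb.1 = c0) ∨ (sb.2 ≠ none ∧ sb.1 < c0))

theorem step_rel (cs : List Int) (c0 : Int) (i j : Nat) (hij : i < j) (hj : j < cs.length)
    (sa : Int × Option (List Int) × List Int) (sb : Int × Option (List Int))
    (h : SGRel cs c0 sa sb) : SGRel cs c0 (sgStepA cs sa i j) (sgStepB cs (sgBase cs) sb i j) := by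
  obtain ⟨h1, h2, h3, h4⟩ := h
  have hcost : calc_cost ((cs.set i (cs.getD j 0)).set j (cs.getD i 0))
      = sgBase cs
        + ((ind (cs.getD j 0) (cs.getD i 0) - ind (cs.getD i 0) (cs.getD j 0))
          + (((cs.drop (i + 1)).take (j - (i + 1))).map
              (fun x => ind (cs.getD j 0) x - ind (cs.getD i 0) x
                + ind x (cs.getD i 0) - ind x (cs.getD j 0))).sum) := by
    rw [calc_cost_inv, sgBase_eq, inv2_swap cs i j hij hj]; ring
  simp only [sgStepA, sgStepB]
  rw [h3, h1, delta_eq cs i j hij hj, hcost]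
  by_cases hlt : sgBase cs
      + ((ind (cs.getD j 0) (cs.getD i 0) - ind (cs.getD i 0) (cs.getD j 0))
        + (((cs.drop (i + 1)).take (j - (i + 1))).map
            (fun x => ind (cs.getD j 0) x - ind (cs.getD i 0) x
              + ind x (cs.getD i 0) - ind x (cs.getD j 0))).sum) < sb.1
  · rw [if_pos hlt, if_pos hlt]
    exact ⟨rfl, rfl, rfl, Or.inr ⟨Option.some_ne_none _,
      by rcases h4 with ⟨_, hc⟩ | ⟨_, hc⟩ <;> omega⟩⟩
  · rw [if_neg hlt, if_neg hlt]
    exact ⟨rfl, h2, rfl, h4⟩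

theorem fold_rel_inner (cs : List Int) (c0 : Int) (i : Nat) :
    ∀ (J : List Nat), (∀ j ∈ J, i < j ∧ j < cs.length) →
      ∀ sa sb, SGRel cs c0 sa sb →
        SGRel cs c0 (J.foldl (fun st j => sgStepA cs st i j) sa)
          (J.foldl (fun st j => sgStepB cs (sgBase cs) st i j) sb) := by
  intro J
  induction J with
  | nil => intro _ sa sb h; exact h
  | cons j J ih =>
      intro hJ sa sb h
      simp only [List.foldl_cons]
      have hj := hJ j (List.mem_cons_self)
      exact ih (fun a ha => hJ a (List.mem_cons_of_mem _ ha)) _ _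
        (step_rel cs c0 i j hj.1 hj.2 sa sb h)

theorem fold_rel_outer (cs : List Int) (c0 : Int) :
    ∀ (I : List Nat) (sa : Int × Option (List Int) × List Int) (sb : Int × Option (List Int)),
      SGRel cs c0 sa sb →
        SGRel cs c0
          (I.foldl (fun st i => (List.range' (i + 1) (cs.length - (i + 1))).foldl
            (fun st j => sgStepA cs st i j) st) sa)
          (I.foldl (fun st i => (List.range' (i + 1) (cs.length - (i + 1))).foldl
            (fun st j => sgStepB cs (sgBase cs) st i j) st) sb) := by
  intro I
  induction I with
  | nil => intro sa sb h; exact h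
  | cons i I ih =>
      intro sa sb h
      simp only [List.foldl_cons]
      refine ih _ _ (fold_rel_inner cs c0 i _ ?_ sa sb h)
      intro j hj
      rw [List.mem_range'] at hj
      obtain ⟨r, hr, rfl⟩ := hj
      omega

-- ===== VERDICT (by name: the statement is the Claim_ definition above) =====
theorem state_generation_spec : Claim_equal_state_generation := by
  intro cs c0 _
  show state_generation cs c0 = state_generation_alt cs c0
  simp only [state_generation, state_generation_alt]
  have h := fold_rel_outer cs c0 (List.range (cs.length - 1))
    (c0, (none : Option (List Int)), cs) (c0, (none : Option (List Int)))
    ⟨rfl, rfl, rfl, Or.inl ⟨rfl, rfl⟩⟩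
  obtain ⟨h1, h2, h3, hd⟩ := h
  rcases hd with ⟨hn, hc⟩ | ⟨hn, hc⟩
  · rw [h1, hn, hc]
    simp
  · obtain ⟨ms, hms⟩ := Option.ne_none_iff_exists'.mp hn
    rw [hms] at h2
    rw [h1, hms, if_pos hc, h2]
    simp
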